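-- pv_equiv track=rewrite | github.com/chessgoose/pacific-wings | Oct1944/scripts/normalize_sortie_extracts.py | is_non_route_coordinate
-- ===== SOURCE A (Python) =====
-- def clean(text: str) -> str:
--     return " ".join((text or "").replace("\n", " ").split()).strip()
--
-- def is_non_route_coordinate(snippet: str):
--     lower = clean(snippet).lower()
--     branch_markers = [
--         "turned home",
--         "turned back",
--         "left formation",
--         "left the formation",
--         "forced to leave",
--         "returned to base",
--         "landed at",
--         "landed by",
--         "diverted",
--         "presumably for",
--         "did not return",
--         "engine trouble",
--         "mechanical trouble",
--         "weather trouble",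
--         "salvo",
--         "jettison",
--         "dropped bombs at",
--     ]
--     observation_markers = [
--         "boat",
--         "barge",
--         "truck",
--         "rail car",
--         "rail cars",
--         "fire",
--         "smoke",
--         "observed",
--         "seen",
--         "tied to the bank",
--         "friendly aircraft",
--     ]
--     return any(marker in lower for marker in branch_markers + observation_markers)
-- ===== SOURCE B (Python) =====
-- _MARKERS = [
--     "turned home",
--     "turned back",
--     "left formation",
--     "left the formation",
--     "forced to leave",
--     "returned to base",
--     "landed at",
--     "landed by",
--     "diverted",
--     "presumably for",
--     "did not return",
--     "engine trouble",
--     "mechanical trouble",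
--     "weather trouble",
--     "salvo",
--     "jettison",
--     "dropped bombs at",
--     "boat",
--     "barge",
--     "truck",
--     "rail car",
--     "rail cars",
--     "fire",
--     "smoke",
--     "observed",
--     "seen",
--     "tied to the bank",
--     "friendly aircraft",
-- ]
--
-- def is_non_route_coordinate(snippet: str):
--     # single left-to-right scan of the text: at each position test whether
--     # some marker starts there, instead of one full substring search per marker
--     suffix = " ".join((snippet or "").replace("\n", " ").split()).strip().lower()
--     while True:
--         if any(suffix.startswith(m) for m in _MARKERS):
--             return True
--         if not suffix:
--             return False
--         suffix = suffix[1:]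
-- ===== Notes on version B (the rewrite author's own statement) =====
-- stated objective: alternative
-- what changed: A runs one independent full-text substring search per marker; B makes a single left-to-right scan of the cleaned text and at each position tests whether any marker starts there (text-major instead of marker-major traversal).
import Mathlib
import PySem

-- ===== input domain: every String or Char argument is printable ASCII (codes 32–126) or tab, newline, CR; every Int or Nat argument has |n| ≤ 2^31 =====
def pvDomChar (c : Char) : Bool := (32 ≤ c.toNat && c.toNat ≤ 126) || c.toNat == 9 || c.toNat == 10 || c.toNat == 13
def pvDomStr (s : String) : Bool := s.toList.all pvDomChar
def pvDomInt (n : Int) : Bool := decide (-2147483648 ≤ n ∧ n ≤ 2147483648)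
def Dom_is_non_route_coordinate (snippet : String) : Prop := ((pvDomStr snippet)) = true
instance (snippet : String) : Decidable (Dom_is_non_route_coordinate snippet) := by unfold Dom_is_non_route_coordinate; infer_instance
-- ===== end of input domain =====

-- B replaces A's per-marker substring searches by a single left-to-right scan of the
-- cleaned text that tests at each position whether some marker starts there (alternative
-- traversal, same cost class).

-- ===== PORT A =====
def pvClean (text : String) : String :=
  PySem.Str.strip (PySem.Str.join " " (PySem.Str.split₀ (PySem.Str.replace text "\n" " ")))

def pvBranchMarkers : List String :=
  ["turned home", "turned back", "left formation", "left the formation",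
   "forced to leave", "returned to base", "landed at", "landed by", "diverted",
   "presumably for", "did not return", "engine trouble", "mechanical trouble",
   "weather trouble", "salvo", "jettison", "dropped bombs at"]

def pvObservationMarkers : List String :=
  ["boat", "barge", "truck", "rail car", "rail cars", "fire", "smoke",
   "observed", "seen", "tied to the bank", "friendly aircraft"]

def is_non_route_coordinate (snippet : String) : Bool :=
  let lower := PySem.Str.lower (pvClean snippet)
  (pvBranchMarkers ++ pvObservationMarkers).any (fun marker => PySem.Str.isIn marker lower)

-- ===== PORT B =====
def pvMarkersB : List String :=
  ["turned home", "turned back", "left formation", "left the formation",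
   "forced to leave", "returned to base", "landed at", "landed by", "diverted",
   "presumably for", "did not return", "engine trouble", "mechanical trouble",
   "weather trouble", "salvo", "jettison", "dropped bombs at",
   "boat", "barge", "truck", "rail car", "rail cars", "fire", "smoke",
   "observed", "seen", "tied to the bank", "friendly aircraft"]

-- B's while-loop: test the markers at the current position, then step to the tail
def pvScan (markers : List (List Char)) (suffix : List Char) : Bool :=
  if markers.any (fun m => PySem.Chars.startswith suffix m) then true
  else
    match suffix with
    | [] => false
    | _ :: rest => pvScan markers rest

def is_non_route_coordinate_alt (snippet : String) : Bool :=
  let suffix := PySem.Str.lower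
    (PySem.Str.strip (PySem.Str.join " " (PySem.Str.split₀ (PySem.Str.replace snippet "\n" " "))))
  pvScan (pvMarkersB.map String.toList) suffix.toList

-- ===== PRECONDITION & SPEC =====
def Spec_is_non_route_coordinate (snippet : String) (out : Bool) : Prop := out = is_non_route_coordinate_alt snippet
instance (snippet : String) (out : Bool) : Decidable (Spec_is_non_route_coordinate snippet out) := by unfold Spec_is_non_route_coordinate; infer_instance

-- ===== CLAIM (what is proved, stated in full; the proofs are below) =====
def Claim_equal_is_non_route_coordinate : Prop := ∀ (snippet : String), Dom_is_non_route_coordinate snippet → Spec_is_non_route_coordinate snippet (is_non_route_coordinate snippet)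

-- ===== LEMMAS AND PROOFS =====

-- the position-by-position scan finds exactly the markers occurring as substrings
theorem pvScan_eq_any_isIn (markers : List (List Char)) (cs : List Char) :
    pvScan markers cs = markers.any (fun m => PySem.Chars.isIn m cs) := by
  induction cs with
  | nil =>
    rw [pvScan, Bool.eq_iff_iff]
    simp only [List.any_eq_true, PySem.Chars.startswith_iff, PySem.Chars.isIn_iff_infix,
      List.prefix_nil, List.infix_nil, Bool.if_true_left, Bool.or_eq_true,
      decide_eq_true_eq, Bool.false_eq_true, or_false]
  | cons c rest ih =>
    rw [pvScan, ih, Bool.eq_iff_iff]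
    simp only [List.any_eq_true, PySem.Chars.startswith_iff, PySem.Chars.isIn_iff_infix,
      List.infix_cons_iff, Bool.if_true_left, Bool.or_eq_true, decide_eq_true_eq]
    aesop

-- ===== VERDICT (by name: the statement is the Claim_ definition above) =====
theorem is_non_route_coordinate_spec : Claim_equal_is_non_route_coordinate := by
  intro snippet _
  unfold Spec_is_non_route_coordinate is_non_route_coordinate is_non_route_coordinate_alt pvClean
  rw [pvScan_eq_any_isIn, List.any_map]
  have hm : pvBranchMarkers ++ pvObservationMarkers = pvMarkersB := by
    simp [pvBranchMarkers, pvObservationMarkers, pvMarkersB]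
  rw [hm]
  simp only [PySem.Str.isIn_eq, Function.comp_def]
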